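-- pv_equiv track=rewrite | github.com/crazysnowboy/StudyBlender | python/setup.py | GetDirFromFilePath
-- ===== SOURCE A (Python) =====
-- def GetDirFromFilePath(file_path,n):
--     cnt=0
--     if n==0:
--         return file_path
--     for i in range(0,len(file_path),1):
--         j = len(file_path)-1-i;
--         if file_path[j]=='/':
--             cnt = cnt + 1
--         if cnt==n:
--             return file_path[0:j]
-- ===== SOURCE B (Python) =====
-- def GetDirFromFilePath(file_path, n):
--     if n == 0:
--         return file_path
--     slashes = [i for i, c in enumerate(file_path) if c == '/']
--     if n < 0 or len(slashes) < n:
--         return None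
--     return file_path[:slashes[len(slashes) - n]]
-- ===== Notes on version B (the rewrite author's own statement) =====
-- stated objective: idiomatic
-- what changed: One forward pass collects the slash positions and the answer is read off by direct indexing of the nth-from-last slash, instead of A's reverse character scan with a running counter and early return.
import Mathlib
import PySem

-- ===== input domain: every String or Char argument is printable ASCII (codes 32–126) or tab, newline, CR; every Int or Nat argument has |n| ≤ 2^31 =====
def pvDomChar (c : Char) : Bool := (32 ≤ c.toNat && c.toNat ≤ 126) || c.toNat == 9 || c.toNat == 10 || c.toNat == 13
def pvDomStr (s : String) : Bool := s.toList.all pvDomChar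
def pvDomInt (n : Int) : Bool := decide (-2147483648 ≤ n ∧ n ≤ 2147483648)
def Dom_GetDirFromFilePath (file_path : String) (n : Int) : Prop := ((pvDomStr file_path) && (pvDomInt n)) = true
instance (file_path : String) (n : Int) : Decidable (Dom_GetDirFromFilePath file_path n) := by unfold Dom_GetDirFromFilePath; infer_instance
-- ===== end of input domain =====

-- B replaces A's reverse character scan (counter, early return) by one forward pass
-- collecting the slash positions and direct indexing of the nth-from-last slash (idiomatic).

-- ===== PORT A =====
-- A's loop: i = 0,1,…,len-1 with j = len-1-i, i.e. j counts down len-1,…,0.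
-- Transcribed by recursion on k = j+1 (the number of iterations still to run).
-- The 'none' arm of the match is unreachable (k < l.length on every call): it only makes the indexing total.
def pvLoopA (l : List Char) (n : Int) : Nat → Int → Option String
  | 0, _ => none                                   -- loop fell through: Python returns None
  | k + 1, cnt =>
    match l[k]? with                               -- file_path[j], j in range
    | none => none
    | some c =>
      let cnt' := if c == '/' then cnt + 1 else cnt
      if cnt' == n then some (String.ofList (PySem.List.slice l (some 0) (some (k : Int))))  -- file_path[0:j]
      else pvLoopA l n k cnt'

def GetDirFromFilePath (file_path : String) (n : Int) : Option String :=
  if n == 0 then some file_path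
  else pvLoopA file_path.toList n file_path.toList.length 0

-- ===== PORT B =====
def GetDirFromFilePath_alt (file_path : String) (n : Int) : Option String :=
  if n == 0 then some file_path
  else
    let slashes := ((PySem.List.enumerate file_path.toList 0).filter (fun p => p.2 == '/')).map (·.1)
    if n < 0 || (slashes.length : Int) < n then none
    else
      match PySem.List.pyGet? slashes ((slashes.length : Int) - n) with   -- slashes[len(slashes)-n], in range
      | some j => some (String.ofList (PySem.List.slice file_path.toList none (some j)))  -- file_path[:j]
      | none => none

-- ===== PRECONDITION & SPEC =====
def Spec_GetDirFromFilePath (file_path : String) (n : Int) (out : Option String) : Prop := out = GetDirFromFilePath_alt file_path n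
instance (file_path : String) (n : Int) (out : Option String) : Decidable (Spec_GetDirFromFilePath file_path n out) := by unfold Spec_GetDirFromFilePath; infer_instance

-- ===== CLAIM (what is proved, stated in full; the proofs are below) =====
def Claim_equal_GetDirFromFilePath : Prop := ∀ (file_path : String) (n : Int), Dom_GetDirFromFilePath file_path n → Spec_GetDirFromFilePath file_path n (GetDirFromFilePath file_path n)

-- ===== LEMMAS AND PROOFS =====

-- one cons step of the ascending slash-position list
theorem pvFilterRange_succ (c : Char) (t : List Char) :
    (List.range (c :: t).length).filter (fun j => (c :: t)[j]? == some '/')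
      = (if c = '/' then [0] else []) ++ ((List.range t.length).filter (fun j => t[j]? == some '/')).map (· + 1) := by
  simp only [List.length_cons, List.range_succ_eq_map]
  rw [List.filter_cons, List.filter_map]
  by_cases hc : c = '/'
  · simp [hc, Function.comp_def, Nat.succ_eq_add_one]
  · simp [hc, Function.comp_def, Nat.succ_eq_add_one]

-- B's enumerate/filter/map pipeline computes the slash positions (shifted by the start)
theorem pvEnum_eq (l : List Char) (s : Int) :
    ((PySem.List.enumerate l s).filter (fun p => p.2 == '/')).map (·.1)
      = ((List.range l.length).filter (fun j => l[j]? == some '/')).map (fun (j : Nat) => s + (j : Int)) := by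
  induction l generalizing s with
  | nil => simp [PySem.List.enumerate_nil]
  | cons c t ih =>
    rw [PySem.List.enumerate_cons, List.filter_cons, pvFilterRange_succ, List.map_append, List.map_map]
    have hmap : ((List.range t.length).filter (fun j => t[j]? == some '/')).map ((fun (j : Nat) => s + (j : Int)) ∘ (· + 1))
        = ((List.range t.length).filter (fun j => t[j]? == some '/')).map (fun (j : Nat) => (s + 1) + (j : Int)) := by
      apply List.map_congr_left; intro j _; simp [Function.comp_def]; push_cast; ring
    rw [hmap, ← ih]
    by_cases hc : c = '/'
    · simp [hc]
    · simp [hc]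

-- what A's loop computes, for cnt < n: the (n-cnt)-th-from-last slash position below k
theorem pvLoopA_spec (l : List Char) (n : Int) :
    ∀ (k : Nat), k ≤ l.length → ∀ (cnt : Int), cnt < n →
      pvLoopA l n k cnt =
        (let F := (List.range k).filter (fun j => l[j]? == some '/')
         if (F.length : Int) < n - cnt then none
         else F[F.length - (n - cnt).toNat]?.map (fun j => String.ofList (l.take j))) := by
  intro k
  induction k with
  | zero =>
    intro _ cnt hcnt
    simp only [pvLoopA, List.range_zero, List.filter_nil, List.length_nil, Nat.cast_zero]
    rw [if_pos (by omega)]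
  | succ k ih =>
    intro hk cnt hcnt
    have hklt : k < l.length := by omega
    have hget : l[k]? = some l[k] := List.getElem?_eq_getElem hklt
    simp only [List.range_succ, List.filter_append, List.filter_cons, List.filter_nil]
    rw [pvLoopA, hget]
    by_cases hc : l[k] = '/'
    · have hb : (l[k] == '/') = true := by simp [hc]
      have hb? : (some l[k] == some ('/' : Char)) = true := by simp [hc]
      simp only [hb, hb?, eq_self_iff_true, if_true]
      set F := (List.range k).filter (fun j => l[j]? == some '/') with hF
      by_cases hn : cnt + 1 = n
      · rw [if_pos (by simp [hn])]
        have h1 : ¬ ((F ++ [k]).length : Int) < n - cnt := by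
          simp only [List.length_append, List.length_cons, List.length_nil]; push_cast; omega
        rw [if_neg h1]
        have h2 : (F ++ [k]).length - (n - cnt).toNat = F.length := by
          simp only [List.length_append, List.length_cons, List.length_nil]; omega
        rw [h2]
        have h3 : (F ++ [k])[F.length]? = some k := by
          rw [List.getElem?_append_right (le_refl _)]
          simp
        rw [h3]
        simp [PySem.List.slice_zero_start, PySem.List.slice_to_natCast]
      · rw [if_neg (by simp [hn])]
        have hcnt' : cnt + 1 < n := by omega
        rw [ih (by omega) (cnt + 1) hcnt']
        simp only
        by_cases hlen : (F.length : Int) < n - (cnt + 1)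
        · rw [if_pos hlen,
            if_pos (by simp only [List.length_append, List.length_cons, List.length_nil]; push_cast; omega)]
        · rw [if_neg hlen,
            if_neg (by simp only [List.length_append, List.length_cons, List.length_nil]; push_cast; omega)]
          have hidx : (F ++ [k]).length - (n - cnt).toNat = F.length - (n - (cnt + 1)).toNat := by
            simp only [List.length_append, List.length_cons, List.length_nil]; omega
          rw [hidx]
          have hlt : F.length - (n - (cnt + 1)).toNat < F.length := by omega
          rw [List.getElem?_append_left hlt]
    · have hb : (l[k] == '/') = false := by simp [hc]
      have hb? : (some l[k] == some ('/' : Char)) = false := by simp [hc]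
      simp only [hb, hb?, Bool.false_eq_true, if_false, List.append_nil]
      rw [if_neg (by simp; omega)]
      exact ih (by omega) cnt hcnt

-- for n < 0 the counter (always ≥ 0) never hits n: the loop falls through
theorem pvLoopA_neg (l : List Char) (n : Int) (hn : n < 0) :
    ∀ (k : Nat) (cnt : Int), 0 ≤ cnt → pvLoopA l n k cnt = none := by
  intro k
  induction k with
  | zero => intro cnt _; simp [pvLoopA]
  | succ k ih =>
    intro cnt hcnt
    rw [pvLoopA]
    cases hget : l[k]? with
    | none => rfl
    | some c =>
      simp only
      by_cases hc : (c == '/') = true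
      · simp only [hc, eq_self_iff_true, if_true]
        rw [if_neg (by simp; omega)]
        exact ih _ (by omega)
      · simp only [eq_false_of_ne_true hc, Bool.false_eq_true, if_false]
        rw [if_neg (by simp; omega)]
        exact ih _ (by omega)

-- ===== VERDICT (by name: the statement is the Claim_ definition above) =====
theorem GetDirFromFilePath_spec : Claim_equal_GetDirFromFilePath := by
  intro fp n _
  show GetDirFromFilePath fp n = GetDirFromFilePath_alt fp n
  unfold GetDirFromFilePath GetDirFromFilePath_alt
  by_cases h0 : n = 0
  · simp [h0]
  · rw [if_neg (by simpa using h0), if_neg (by simpa using h0)]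
    rw [pvEnum_eq]
    set l := fp.toList with hl
    set I := (List.range l.length).filter (fun j => l[j]? == some '/') with hI
    have hmap0 : I.map (fun (j : Nat) => (0 : Int) + (j : Int)) = I.map (fun (j : Nat) => (j : Int)) := by
      simp
    rw [hmap0]
    by_cases hneg : n < 0
    · rw [pvLoopA_neg l n hneg _ 0 le_rfl]
      rw [if_pos (by simp [hneg])]
    · have hn1 : 1 ≤ n := by omega
      rw [pvLoopA_spec l n l.length le_rfl 0 (by omega)]
      simp only [← hI, sub_zero, List.length_map]
      by_cases hlen : (I.length : Int) < n
      · rw [if_pos hlen, if_pos (by simp [hlen])]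
      · rw [if_neg hlen, if_neg (by simp [hlen, hneg])]
        have hidx : ((I.length : Int) - n) = ((I.length - n.toNat : Nat) : Int) := by omega
        rw [hidx, PySem.List.pyGet?_natCast, List.getElem?_map]
        have hlt : I.length - n.toNat < I.length := by omega
        rw [List.getElem?_eq_getElem hlt]
        simp only [Option.map_some]
        rw [PySem.List.slice_to_natCast l (I[I.length - n.toNat])]
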